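-- pv_equiv track=rewrite | github.com/rjames187/Leetcode-solutions | basicRecursionProblems.py | array220
-- ===== SOURCE A (Python) =====
-- def array220(nums, index):
--     if index > len(nums) - 2:
--         return False
--     elif index == len(nums) - 2:
--         return nums[index + 1] == nums[index] * 10
--     else:
--         if (nums[index] * 10) in nums[index:]:
--             return True
--         else:
--             return array220(nums, index + 1)
-- ===== SOURCE B (Python) =====
-- def array220(nums, index):
--     n = len(nums)
--     for j in range(index, n - 1):
--         if j == n - 2:
--             return nums[j + 1] == nums[j] * 10
--         if nums[j] * 10 in nums[j:]:
--             return True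
--     return False
-- ===== Notes on version B (the rewrite author's own statement) =====
-- stated objective: alternative
-- what changed: Replaces the tail recursion with a single explicit iterative loop over range(index, len(nums)-1), keeping the asymmetric last-pair base case inside the loop.
-- outside the precondition, e.g. on array220([], -2): A raises IndexError, B raises IndexError; on array220([5], -2): A raises IndexError, B raises IndexError
import Mathlib
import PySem

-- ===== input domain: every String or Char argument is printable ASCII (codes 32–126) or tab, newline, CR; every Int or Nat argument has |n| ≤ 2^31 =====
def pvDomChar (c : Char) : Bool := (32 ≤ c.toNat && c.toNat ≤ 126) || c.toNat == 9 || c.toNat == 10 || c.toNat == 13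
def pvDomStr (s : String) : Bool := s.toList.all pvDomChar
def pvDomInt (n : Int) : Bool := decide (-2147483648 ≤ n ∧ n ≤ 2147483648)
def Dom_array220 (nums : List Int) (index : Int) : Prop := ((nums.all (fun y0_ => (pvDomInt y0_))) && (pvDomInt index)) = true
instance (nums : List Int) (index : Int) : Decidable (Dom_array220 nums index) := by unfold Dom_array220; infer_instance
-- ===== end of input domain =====

-- B replaces A's tail recursion by one explicit iterative loop over range(index, len-1); same cost, different decomposition.

-- ===== PORT A =====
-- literal transliteration of A's tail recursion (indexing via pyGetD; valid under Pre_)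
def array220 (nums : List Int) (index : Int) : Bool :=
  if index > (nums.length : Int) - 2 then false
  else if index = (nums.length : Int) - 2 then
    PySem.List.pyGetD nums (index + 1) 0 == PySem.List.pyGetD nums index 0 * 10
  else
    if (PySem.List.pyGetD nums index 0 * 10) ∈ PySem.List.slice nums (some index) none then true
    else array220 nums (index + 1)
termination_by ((nums.length : Int) - 2 - index).toNat
decreasing_by omega

-- ===== PORT B =====
-- B's for-loop over range(index, n-1): structural recursion over the list of loop indices j
def array220AltGo (nums : List Int) (n : Int) : List Int → Bool
  | [] => false
  | j :: js =>
    if j = n - 2 then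
      PySem.List.pyGetD nums (j + 1) 0 == PySem.List.pyGetD nums j 0 * 10
    else if (PySem.List.pyGetD nums j 0 * 10) ∈ PySem.List.slice nums (some j) none then true
    else array220AltGo nums n js

def array220_alt (nums : List Int) (index : Int) : Bool :=
  array220AltGo nums (nums.length : Int) (PySem.List.pyRange index ((nums.length : Int) - 1) 1)

-- ===== PRECONDITION & SPEC =====
-- Pre_ excludes exactly the inputs where Python A raises IndexError: index ≤ len-2 with index < -len
-- (a too-negative index reaches nums[index], including the empty list with index = -2).
def Pre_array220 (nums : List Int) (index : Int) : Prop :=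
  (nums.length : Int) - 2 < index ∨ -(nums.length : Int) ≤ index
instance (nums : List Int) (index : Int) : Decidable (Pre_array220 nums index) := by
  unfold Pre_array220; infer_instance

def pvWitness_array220 : List Int × Int := ([10, 100], 0)

def Spec_array220 (nums : List Int) (index : Int) (out : Bool) : Prop := out = array220_alt nums index
instance (nums : List Int) (index : Int) (out : Bool) : Decidable (Spec_array220 nums index out) := by
  unfold Spec_array220; infer_instance

-- ===== CLAIM (what is proved, stated in full; the proofs are below) =====
def Claim_equal_array220 : Prop := ∀ (nums : List Int) (index : Int), Dom_array220 nums index → Pre_array220 nums index → Spec_array220 nums index (array220 nums index)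

-- ===== LEMMAS AND PROOFS =====

-- A's recursion equals B's loop over the remaining index range, for every starting index.
lemma array220_eq_go (nums : List Int) :
    ∀ (k : Nat) (index : Int), ((nums.length : Int) - 1 - index).toNat ≤ k →
      array220 nums index
        = array220AltGo nums (nums.length : Int) (PySem.List.pyRange index ((nums.length : Int) - 1) 1) := by
  intro k
  induction k with
  | zero =>
    intro index hk
    have h : (nums.length : Int) - 2 < index := by omega
    rw [array220, PySem.List.pyRange_one_eq_nil (by omega)]
    simp [array220AltGo, h]
  | succ k ih =>
    intro index hk
    by_cases h1 : (nums.length : Int) - 2 < index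
    · rw [array220, PySem.List.pyRange_one_eq_nil (by omega)]
      simp [array220AltGo, h1]
    · rw [PySem.List.pyRange_one_cons (by omega)]
      by_cases h2 : index = (nums.length : Int) - 2
      · rw [array220]
        simp [array220AltGo, h2]
      · rw [array220]
        simp only [array220AltGo, if_neg h1, if_neg h2]
        by_cases h3 : (PySem.List.pyGetD nums index 0 * 10) ∈ PySem.List.slice nums (some index) none
        · simp [h3]
        · simp only [if_neg h3]
          exact ih (index + 1) (by omega)

-- ===== VERDICT (by name: the statement is the Claim_ definition above) =====
theorem array220_spec : Claim_equal_array220 := by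
  intro nums index _ _
  unfold Spec_array220 array220_alt
  exact array220_eq_go nums ((nums.length : Int) - 1 - index).toNat index le_rfl
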